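-- pv_equiv track=rewrite | github.com/KaurakitLeenip/PoemGenerator | main.py | check_syl_set
-- ===== SOURCE A (Python) =====
-- def check_syl_set(syls, rhyming_syls):
--     res = True
--     i = 0
--     for rhyming in rhyming_syls:
--         total = 0
--         for syl in syls:
--             total += syl
--             if total > rhyming:
--                 res = False
--                 break
--             elif total == rhyming:
--                 break
--     return res
-- ===== SOURCE B (Python) =====
-- def check_syl_set(syls, rhyming_syls):
--     # One pass over syls: collect the prefix sums that are running maxima
--     # (the only sums A's scan can stop at with a match) and the overall max.
--     ok_vals = set()
--     running_max = None
--     total = 0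
--     for s in syls:
--         total += s
--         if running_max is None or total >= running_max:
--             running_max = total
--             ok_vals.add(total)
--     if running_max is None:
--         return True
--     return all(running_max <= r or r in ok_vals for r in rhyming_syls)
-- ===== Notes on version B (the rewrite author's own statement) =====
-- stated objective: faster
-- what changed: Instead of rescanning syls for every rhyming value, B makes one pass over syls collecting the set of record prefix sums (the only values A's scan can stop at successfully) and the maximum prefix sum, then answers each rhyming value by one set-membership test.
import Mathlib
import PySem

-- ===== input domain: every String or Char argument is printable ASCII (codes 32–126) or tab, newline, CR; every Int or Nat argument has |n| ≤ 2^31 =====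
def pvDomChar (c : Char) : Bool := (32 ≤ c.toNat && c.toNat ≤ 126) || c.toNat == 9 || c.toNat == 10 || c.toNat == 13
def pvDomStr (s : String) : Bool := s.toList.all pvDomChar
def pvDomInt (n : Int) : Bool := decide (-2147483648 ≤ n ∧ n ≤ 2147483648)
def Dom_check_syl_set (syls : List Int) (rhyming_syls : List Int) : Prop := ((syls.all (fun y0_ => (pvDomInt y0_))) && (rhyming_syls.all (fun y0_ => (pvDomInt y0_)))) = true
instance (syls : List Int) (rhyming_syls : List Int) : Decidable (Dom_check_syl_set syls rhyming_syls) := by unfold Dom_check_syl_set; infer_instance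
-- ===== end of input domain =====

-- B replaces A's per-rhyming rescan of syls by one pass collecting the record prefix sums
-- and the maximum prefix sum, then one membership test per rhyming value (faster: O(S+R) vs O(R*S)).

-- ===== PORT A =====
-- inner 'for syl in syls' loop of A: total accumulates, break-with-False on total > rhyming,
-- break (keeping res) on total == rhyming
def aLoop (r total : Int) : List Int → Bool → Bool
  | [], res => res
  | s :: ss, res =>
    let t := total + s
    if r < t then false
    else if t = r then res
    else aLoop r t ss res

def check_syl_set (syls : List Int) (rhyming_syls : List Int) : Bool :=
  rhyming_syls.foldl (fun res r => aLoop r 0 syls res) true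

-- ===== PORT B =====
-- the single 'for s in syls' loop of B: state (total, running_max, ok_vals)
def bLoop (total : Int) (m : Option Int) (okVals : PySem.Set Int) : List Int → Option Int × PySem.Set Int
  | [] => (m, okVals)
  | s :: ss =>
    let t := total + s
    match m with
    | none => bLoop t (some t) (PySem.Set.add okVals t) ss
    | some mv =>
      if mv ≤ t then bLoop t (some t) (PySem.Set.add okVals t) ss
      else bLoop t (some mv) okVals ss

def check_syl_set_alt (syls : List Int) (rhyming_syls : List Int) : Bool :=
  match bLoop 0 none PySem.Set.empty syls with
  | (none, _) => true
  | (some m, okVals) => rhyming_syls.all (fun r => decide (m ≤ r) || PySem.Set.contains okVals r)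

-- ===== PRECONDITION & SPEC =====
def Spec_check_syl_set (syls : List Int) (rhyming_syls : List Int) (out : Bool) : Prop := out = check_syl_set_alt syls rhyming_syls
instance (syls : List Int) (rhyming_syls : List Int) (out : Bool) : Decidable (Spec_check_syl_set syls rhyming_syls out) := by unfold Spec_check_syl_set; infer_instance

-- ===== CLAIM (what is proved, stated in full; the proofs are below) =====
def Claim_equal_check_syl_set : Prop := ∀ (syls : List Int) (rhyming_syls : List Int), Dom_check_syl_set syls rhyming_syls → Spec_check_syl_set syls rhyming_syls (check_syl_set syls rhyming_syls)

-- ===== LEMMAS AND PROOFS =====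

-- B's final answer for one rhyming value r, read off the loop's final state
def ansOf (r : Int) : Option Int × PySem.Set Int → Bool
  | (none, _) => true
  | (some m, okVals) => decide (m ≤ r) || PySem.Set.contains okVals r

theorem aLoop_false (r : Int) : ∀ (l : List Int) (t : Int), aLoop r t l false = false := by
  intro l
  induction l with
  | nil => intro t; rfl
  | cons s ss ih =>
    intro t
    simp only [aLoop]
    split_ifs with h1 h2 <;> simp [ih]

theorem bLoop_mem (r : Int) : ∀ (l : List Int) (t : Int) (m : Option Int) (S : PySem.Set Int),
    r ∈ S → ansOf r (bLoop t m S l) = true := by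
  intro l
  induction l with
  | nil =>
    intro t m S hr
    cases m with
    | none => rfl
    | some mv => simp [bLoop, ansOf]; right; exact hr
  | cons s ss ih =>
    intro t m S hr
    cases m with
    | none =>
      simp only [bLoop]
      exact ih _ _ _ (by simp [PySem.Set.mem_add]; left; exact hr)
    | some mv =>
      simp only [bLoop]
      split_ifs with h
      · exact ih _ _ _ (by simp [PySem.Set.mem_add]; left; exact hr)
      · exact ih _ _ _ hr

theorem bLoop_lt (r : Int) : ∀ (l : List Int) (t mv : Int) (S : PySem.Set Int),
    r < mv → r ∉ S → ansOf r (bLoop t (some mv) S l) = false := by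
  intro l
  induction l with
  | nil =>
    intro t mv S hlt hnm
    simp [bLoop, ansOf]
    exact ⟨by omega, hnm⟩
  | cons s ss ih =>
    intro t mv S hlt hnm
    simp only [bLoop]
    split_ifs with h
    · exact ih _ _ _ (by omega) (by simp [PySem.Set.mem_add]; exact ⟨hnm, by omega⟩)
    · exact ih _ _ _ hlt hnm

theorem bLoop_main (r : Int) : ∀ (l : List Int) (t mv : Int) (S : PySem.Set Int),
    mv ≤ r → r ∉ S → ansOf r (bLoop t (some mv) S l) = aLoop r t l true := by
  intro l
  induction l with
  | nil =>
    intro t mv S hle hnm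
    simp [bLoop, ansOf, aLoop, hle]
  | cons s ss ih =>
    intro t mv S hle hnm
    simp only [bLoop, aLoop]
    split_ifs with hcmp hgt heq hgt' heq'
    · exact bLoop_lt r ss _ _ _ hgt (by simp [PySem.Set.mem_add]; exact ⟨hnm, by omega⟩)
    · exact bLoop_mem r ss _ _ _ (by simp [PySem.Set.mem_add]; right; omega)
    · exact ih _ _ _ (by omega) (by simp [PySem.Set.mem_add]; exact ⟨hnm, by omega⟩)
    · exact bLoop_lt r ss _ _ _ (by omega) hnm
    · omega
    · exact ih _ _ _ hle hnm

-- per-rhyming agreement from the initial state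
theorem perR (syls : List Int) (r : Int) :
    aLoop r 0 syls true = ansOf r (bLoop 0 none PySem.Set.empty syls) := by
  cases syls with
  | nil => rfl
  | cons s ss =>
    simp only [bLoop, aLoop]
    split_ifs with hgt heq
    · exact (bLoop_lt r ss _ _ _ hgt (by simp [PySem.Set.empty]; omega)).symm
    · exact (bLoop_mem r ss _ _ _ (by simp [PySem.Set.empty]; omega)).symm
    · exact (bLoop_main r ss _ _ _ (by omega) (by simp [PySem.Set.empty]; omega)).symm

theorem foldl_all (syls : List Int) : ∀ (rs : List Int) (res : Bool),
    rs.foldl (fun res r => aLoop r 0 syls res) res = (res && rs.all (fun r => aLoop r 0 syls true)) := by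
  intro rs
  induction rs with
  | nil => intro res; simp
  | cons r rs ih =>
    intro res
    cases res with
    | false => simp [List.foldl, aLoop_false, ih]
    | true => simp [List.foldl, ih]

-- ===== VERDICT (by name: the statement is the Claim_ definition above) =====
theorem check_syl_set_spec : Claim_equal_check_syl_set := by
  intro syls rs _
  unfold Spec_check_syl_set check_syl_set check_syl_set_alt
  rw [foldl_all]
  simp only [Bool.true_and]
  rcases h : bLoop 0 none PySem.Set.empty syls with ⟨m, S⟩
  cases m with
  | none =>
    simp only []
    apply List.all_eq_true.mpr
    intro r hr
    have := perR syls r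
    rw [h] at this
    simpa [ansOf] using this
  | some mv =>
    have hf : (fun r => aLoop r 0 syls true) = (fun r => decide (mv ≤ r) || PySem.Set.contains S r) := by
      funext r
      have := perR syls r
      rw [h] at this
      simpa [ansOf] using this
    rw [hf]
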